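-- pv_equiv track=rewrite | github.com/haoit/web_cloner | web_cloner.py | get_resource_type
-- ===== SOURCE A (Python) =====
-- def get_resource_type(url, content_type=None):
--     """Xác định loại tài nguyên dựa vào URL và content-type"""
--     url_lower = url.lower()
--
--     # Kiểm tra extension
--     if any(url_lower.endswith(ext) for ext in ['.css']):
--         return 'css'
--     elif any(url_lower.endswith(ext) for ext in ['.js']):
--         return 'js'
--     elif any(url_lower.endswith(ext) for ext in ['.png', '.jpg', '.jpeg', '.gif', '.svg', '.webp', '.ico', '.bmp']):
--         return 'images'
--     elif any(url_lower.endswith(ext) for ext in ['.woff', '.woff2', '.ttf', '.eot', '.otf']):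
--         return 'fonts'
--     elif any(url_lower.endswith(ext) for ext in ['.mp4', '.webm', '.ogg', '.mp3', '.wav']):
--         return 'media'
--
--     # Kiểm tra content-type
--     if content_type:
--         if 'text/css' in content_type:
--             return 'css'
--         elif 'javascript' in content_type:
--             return 'js'
--         elif 'image' in content_type:
--             return 'images'
--         elif 'font' in content_type:
--             return 'fonts'
--         elif 'video' in content_type or 'audio' in content_type:
--             return 'media'
--
--     return 'other'
-- ===== SOURCE B (Python) =====
-- _EXT_MAP = {
--     'css': 'css', 'js': 'js',
--     'png': 'images', 'jpg': 'images', 'jpeg': 'images', 'gif': 'images',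
--     'svg': 'images', 'webp': 'images', 'ico': 'images', 'bmp': 'images',
--     'woff': 'fonts', 'woff2': 'fonts', 'ttf': 'fonts', 'eot': 'fonts', 'otf': 'fonts',
--     'mp4': 'media', 'webm': 'media', 'ogg': 'media', 'mp3': 'media', 'wav': 'media',
-- }
--
--
-- def get_resource_type(url, content_type=None):
--     url_lower = url.lower()
--     # one suffix extraction + one hash lookup instead of 19 endswith tests:
--     # the part after the LAST dot decides, since no known extension contains a dot
--     dot = url_lower.rfind('.')
--     if dot != -1:
--         rtype = _EXT_MAP.get(url_lower[dot + 1:])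
--         if rtype is not None:
--             return rtype
--     if content_type:
--         if 'text/css' in content_type:
--             return 'css'
--         if 'javascript' in content_type:
--             return 'js'
--         if 'image' in content_type:
--             return 'images'
--         if 'font' in content_type:
--             return 'fonts'
--         if 'video' in content_type or 'audio' in content_type:
--             return 'media'
--     return 'other'
-- ===== Notes on version B (the rewrite author's own statement) =====
-- stated objective: alternative
-- what changed: Instead of testing the URL against 19 dotted extension suffixes in an if/elif chain, B extracts the part after the LAST dot once (rfind + slice) and resolves it with a single lookup in an extension-to-type dict; the content-type fallback keeps A's ordered substring checks.
import Mathlib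
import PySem

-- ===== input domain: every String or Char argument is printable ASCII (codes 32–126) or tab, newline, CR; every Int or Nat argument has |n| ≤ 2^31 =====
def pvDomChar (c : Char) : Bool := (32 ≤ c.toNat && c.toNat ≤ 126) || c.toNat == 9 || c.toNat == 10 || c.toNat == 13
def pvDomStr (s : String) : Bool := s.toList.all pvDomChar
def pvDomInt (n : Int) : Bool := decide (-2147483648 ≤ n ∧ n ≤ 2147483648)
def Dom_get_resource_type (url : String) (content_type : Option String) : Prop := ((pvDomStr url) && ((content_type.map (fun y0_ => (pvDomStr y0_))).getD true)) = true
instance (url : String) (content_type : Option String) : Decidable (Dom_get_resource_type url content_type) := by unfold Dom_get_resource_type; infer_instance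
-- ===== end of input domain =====

-- B replaces A's chain of 19 endswith suffix tests by ONE rfind('.') + ONE hash lookup of the
-- part after the last dot in an extension→type dict (valid because no known extension contains
-- a dot); objective: alternative/idiomatic, same asymptotic cost.

-- ===== PORT A =====
def get_resource_type (url : String) (content_type : Option String) : String :=
  let url_lower := PySem.Str.lower url
  if [".css"].any (fun ext => PySem.Str.endswith url_lower ext) then "css"
  else if [".js"].any (fun ext => PySem.Str.endswith url_lower ext) then "js"
  else if [".png", ".jpg", ".jpeg", ".gif", ".svg", ".webp", ".ico", ".bmp"].any
      (fun ext => PySem.Str.endswith url_lower ext) then "images"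
  else if [".woff", ".woff2", ".ttf", ".eot", ".otf"].any
      (fun ext => PySem.Str.endswith url_lower ext) then "fonts"
  else if [".mp4", ".webm", ".ogg", ".mp3", ".wav"].any
      (fun ext => PySem.Str.endswith url_lower ext) then "media"
  else
    match content_type with
    | some ct =>
      if ct ≠ "" then  -- Python truthiness of the string
        if PySem.Str.isIn "text/css" ct then "css"
        else if PySem.Str.isIn "javascript" ct then "js"
        else if PySem.Str.isIn "image" ct then "images"
        else if PySem.Str.isIn "font" ct then "fonts"
        else if PySem.Str.isIn "video" ct || PySem.Str.isIn "audio" ct then "media"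
        else "other"
      else "other"
    | none => "other"

-- ===== PORT B =====
def pvExtMap : PySem.Dict String String :=
  PySem.Dict.ofList
    [("css", "css"), ("js", "js"),
     ("png", "images"), ("jpg", "images"), ("jpeg", "images"), ("gif", "images"),
     ("svg", "images"), ("webp", "images"), ("ico", "images"), ("bmp", "images"),
     ("woff", "fonts"), ("woff2", "fonts"), ("ttf", "fonts"), ("eot", "fonts"), ("otf", "fonts"),
     ("mp4", "media"), ("webm", "media"), ("ogg", "media"), ("mp3", "media"), ("wav", "media")]

def get_resource_type_alt (url : String) (content_type : Option String) : String :=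
  let url_lower := PySem.Str.lower url
  let dot := PySem.Str.rfind url_lower "."
  let hit : Option String :=
    if dot ≠ -1 then pvExtMap.get? (PySem.Str.slice url_lower (some (dot + 1)) none)
    else none
  match hit with
  | some rtype => rtype
  | none =>
    match content_type with
    | some ct =>
      if ct ≠ "" then  -- Python truthiness of the string
        if PySem.Str.isIn "text/css" ct then "css"
        else if PySem.Str.isIn "javascript" ct then "js"
        else if PySem.Str.isIn "image" ct then "images"
        else if PySem.Str.isIn "font" ct then "fonts"
        else if PySem.Str.isIn "video" ct || PySem.Str.isIn "audio" ct then "media"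
        else "other"
      else "other"
    | none => "other"

-- ===== PRECONDITION & SPEC =====
def Spec_get_resource_type (url : String) (content_type : Option String) (out : String) : Prop := out = get_resource_type_alt url content_type
instance (url : String) (content_type : Option String) (out : String) : Decidable (Spec_get_resource_type url content_type out) := by unfold Spec_get_resource_type; infer_instance

-- ===== CLAIM (what is proved, stated in full; the proofs are below) =====
def Claim_equal_get_resource_type : Prop := ∀ (url : String) (content_type : Option String), Dom_get_resource_type url content_type → Spec_get_resource_type url content_type (get_resource_type url content_type)

-- ===== LEMMAS AND PROOFS =====

-- rfind.go s sub k either finds no prefix position ≤ k, or returns the largest one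
lemma pv_go_cases (s sub : List Char) (k : Nat) :
    (PySem.Chars.rfind.go s sub k = -1 ∧ ∀ j : Nat, j ≤ k → ¬ sub <+: s.drop j) ∨
    (∃ m : Nat, PySem.Chars.rfind.go s sub k = (m : Int) ∧ m ≤ k ∧ sub <+: s.drop m ∧
      ∀ j : Nat, m < j → j ≤ k → ¬ sub <+: s.drop j) := by
  induction k with
  | zero =>
    by_cases h : sub.isPrefixOf s
    · right
      refine ⟨0, by simp [PySem.Chars.rfind.go, h], le_refl 0, ?_, by omega⟩
      simpa using List.isPrefixOf_iff_prefix.mp h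
    · left
      refine ⟨by simp [PySem.Chars.rfind.go, h], ?_⟩
      intro j hj
      interval_cases j
      simpa [List.isPrefixOf_iff_prefix] using h
  | succ k ih =>
    by_cases h : sub.isPrefixOf (s.drop (k + 1))
    · right
      refine ⟨k + 1, by simp [PySem.Chars.rfind.go, h], le_refl _, List.isPrefixOf_iff_prefix.mp h, by omega⟩
    · have hko : PySem.Chars.rfind.go s sub (k + 1) = PySem.Chars.rfind.go s sub k := by
        simp [PySem.Chars.rfind.go, h]
      have htop : ¬ sub <+: s.drop (k + 1) := by
        simpa [List.isPrefixOf_iff_prefix] using h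
      rcases ih with ⟨h1, h2⟩ | ⟨m, h1, h2, h3, h4⟩
      · left
        refine ⟨by rw [hko]; exact h1, ?_⟩
        intro j hj
        rcases Nat.lt_or_ge j (k + 1) with hj' | hj'
        · exact h2 j (by omega)
        · have : j = k + 1 := by omega
          subst this; exact htop
      · right
        refine ⟨m, by rw [hko]; exact h1, by omega, h3, ?_⟩
        intro j hmj hj
        rcases Nat.lt_or_ge j (k + 1) with hj' | hj'
        · exact h4 j hmj (by omega)
        · have : j = k + 1 := by omega
          subst this; exact htop

-- rfind for '.' : either no dot anywhere, or the position of the LAST dot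
lemma pv_rfind_cases (s : List Char) :
    (PySem.Chars.rfind s ['.'] = -1 ∧ ∀ j : Nat, ¬ ['.'] <+: s.drop j) ∨
    (∃ m : Nat, PySem.Chars.rfind s ['.'] = (m : Int) ∧ ['.'] <+: s.drop m ∧
      ∀ j : Nat, m < j → ¬ ['.'] <+: s.drop j) := by
  have hbig : ∀ j : Nat, s.length < j → ¬ ['.'] <+: s.drop j := by
    intro j hj hp
    rw [List.drop_eq_nil_of_le (le_of_lt hj)] at hp
    simpa using List.prefix_nil.mp hp
  have h := pv_go_cases s ['.'] s.length
  rcases h with ⟨h1, h2⟩ | ⟨m, h1, _, h3, h4⟩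
  · left
    refine ⟨h1, fun j => ?_⟩
    rcases Nat.lt_or_ge s.length j with hj | hj
    · exact hbig j hj
    · exact h2 j hj
  · right
    refine ⟨m, h1, h3, fun j hmj => ?_⟩
    rcases Nat.lt_or_ge s.length j with hj | hj
    · exact hbig j hj
    · exact h4 j hmj hj

-- if the url has no dot at all, no '.xyz' suffix test can succeed
lemma pv_endswith_false (L e : List Char) (h : ∀ j : Nat, ¬ ['.'] <+: L.drop j) :
    PySem.Chars.endswith L ('.' :: e) = false := by
  rw [← Bool.not_eq_true, PySem.Chars.endswith_iff]
  rintro ⟨t, rfl⟩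
  exact h t.length (by simp [List.cons_prefix_iff])

-- with the last dot at position m, url ends with '.'+e  iff  the part after that dot is e
lemma pv_endswith_eq (L e : List Char) (he : '.' ∉ e) (m : Nat)
    (hm : ['.'] <+: L.drop m) (hmax : ∀ j : Nat, m < j → ¬ ['.'] <+: L.drop j) :
    PySem.Chars.endswith L ('.' :: e) = decide (L.drop (m + 1) = e) := by
  obtain ⟨u, hu⟩ : ∃ u, L.drop m = '.' :: u := by
    simpa [List.cons_prefix_iff] using hm
  have hml : m < L.length := by
    by_contra hc
    rw [Nat.not_lt] at hc
    rw [List.drop_eq_nil_of_le hc] at hu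
    cases hu
  have hcons : L.drop m = '.' :: L.drop (m + 1) := by
    have := List.drop_eq_getElem_cons hml
    rw [this] at hu ⊢
    simp only [List.cons.injEq] at hu
    rw [hu.1]
  by_cases h : L.drop (m + 1) = e
  · have hsuf : ('.' :: e) <:+ L := by
      rw [← h, ← hcons]
      exact List.drop_suffix m L
    simp [h, (PySem.Chars.endswith_iff _ _).mpr hsuf]
  · simp only [h, decide_false]
    rw [← Bool.not_eq_true, PySem.Chars.endswith_iff]
    rintro ⟨t, ht⟩
    have hp : ['.'] <+: L.drop t.length := by
      rw [← ht, List.drop_left]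
      simp [List.cons_prefix_iff]
    have h1 : t.length ≤ m := by
      by_contra hc
      exact hmax t.length (by omega) hp
    rcases Nat.lt_or_eq_of_le h1 with hlt | heq
    · -- a dot strictly after position t.length yet inside e: impossible
      have hdropm : L.drop m = ('.' :: e).drop (m - t.length) := by
        rw [← ht, List.drop_append, List.drop_eq_nil_of_le h1]
        simp
      obtain ⟨v, hv⟩ : ∃ v, L.drop m = '.' :: v := ⟨u, hu⟩
      have hq : ('.' :: e).drop (m - t.length) = e.drop (m - t.length - 1) := by
        have : m - t.length = (m - t.length - 1) + 1 := by omega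
        rw [this]
        simp
      have : ('.' : Char) ∈ e := by
        have hmem : ('.' : Char) ∈ e.drop (m - t.length - 1) := by
          rw [← hq, ← hdropm, hv]; exact List.mem_cons_self
        exact List.drop_subset _ _ hmem
      exact he this
    · -- then the part after the last dot would be e, contradicting h
      apply h
      have : L = (t ++ ['.']) ++ e := by rw [← ht]; simp
      rw [this]
      have hlen : (t ++ ['.']).length = m + 1 := by simp [heq]
      rw [← hlen, List.drop_left]

-- ===== VERDICT (by name: the statement is the Claim_ definition above) =====
theorem get_resource_type_spec : Claim_equal_get_resource_type := by
  intro url content_type _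
  unfold Spec_get_resource_type get_resource_type get_resource_type_alt
  simp only [List.any_cons, List.any_nil, Bool.or_false, PySem.Str.endswith_eq,
    PySem.Str.rfind_eq, show (".":String).toList = ['.'] from rfl,
    show (".css":String).toList = '.' :: "css".toList from rfl,
    show (".js":String).toList = '.' :: "js".toList from rfl,
    show (".png":String).toList = '.' :: "png".toList from rfl,
    show (".jpg":String).toList = '.' :: "jpg".toList from rfl,
    show (".jpeg":String).toList = '.' :: "jpeg".toList from rfl,
    show (".gif":String).toList = '.' :: "gif".toList from rfl,
    show (".svg":String).toList = '.' :: "svg".toList from rfl,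
    show (".webp":String).toList = '.' :: "webp".toList from rfl,
    show (".ico":String).toList = '.' :: "ico".toList from rfl,
    show (".bmp":String).toList = '.' :: "bmp".toList from rfl,
    show (".woff":String).toList = '.' :: "woff".toList from rfl,
    show (".woff2":String).toList = '.' :: "woff2".toList from rfl,
    show (".ttf":String).toList = '.' :: "ttf".toList from rfl,
    show (".eot":String).toList = '.' :: "eot".toList from rfl,
    show (".otf":String).toList = '.' :: "otf".toList from rfl,
    show (".mp4":String).toList = '.' :: "mp4".toList from rfl,
    show (".webm":String).toList = '.' :: "webm".toList from rfl,
    show (".ogg":String).toList = '.' :: "ogg".toList from rfl,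
    show (".mp3":String).toList = '.' :: "mp3".toList from rfl,
    show (".wav":String).toList = '.' :: "wav".toList from rfl]
  rcases pv_rfind_cases (PySem.Str.lower url).toList with ⟨h1, h2⟩ | ⟨m, h1, hm, hmax⟩
  · rw [h1]
    simp only [pv_endswith_false _ _ h2]
    simp
  · rw [h1]
    have hd1 : ((m : Int) ≠ -1) := by omega
    have hs : (PySem.Str.slice (PySem.Str.lower url) (some ((m : Int) + 1)) none).toList
        = (PySem.Str.lower url).toList.drop (m + 1) := by
      rw [PySem.Str.toList_slice, PySem.Chars.slice_eq_listSlice,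
        show ((m : Int) + 1) = ((m + 1 : Nat) : Int) from by push_cast; ring]
      exact PySem.List.slice_from_natCast _ _
    set s := PySem.Str.slice (PySem.Str.lower url) (some ((m : Int) + 1)) none with hsdef
    set t := (PySem.Str.lower url).toList.drop (m + 1) with htdef
    have hkey : ∀ key : String, (key == s) = decide (t = key.toList) := by
      intro key
      have hiff : (key = s) ↔ (t = key.toList) := by
        constructor
        · rintro rfl; exact hs.symm
        · intro h2; exact (String.toList_inj.mp (by rw [hs, h2])).symm
      rw [show (key == s) = decide (key = s) from by by_cases hks : key = s <;> simp [hks]]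
      exact decide_eq_decide.mpr hiff
    have E : ∀ e : List Char, '.' ∉ e →
        PySem.Chars.endswith (PySem.Str.lower url).toList ('.' :: e) = decide (t = e) := by
      intro e he
      exact pv_endswith_eq _ e he m hm hmax
    rw [E "css".toList (by decide), E "js".toList (by decide), E "png".toList (by decide),
      E "jpg".toList (by decide), E "jpeg".toList (by decide), E "gif".toList (by decide),
      E "svg".toList (by decide), E "webp".toList (by decide), E "ico".toList (by decide),
      E "bmp".toList (by decide), E "woff".toList (by decide), E "woff2".toList (by decide),
      E "ttf".toList (by decide), E "eot".toList (by decide), E "otf".toList (by decide),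
      E "mp4".toList (by decide), E "webm".toList (by decide), E "ogg".toList (by decide),
      E "mp3".toList (by decide), E "wav".toList (by decide)]
    rw [show pvExtMap = PySem.Dict.mk
      [("css", "css"), ("js", "js"),
       ("png", "images"), ("jpg", "images"), ("jpeg", "images"), ("gif", "images"),
       ("svg", "images"), ("webp", "images"), ("ico", "images"), ("bmp", "images"),
       ("woff", "fonts"), ("woff2", "fonts"), ("ttf", "fonts"), ("eot", "fonts"), ("otf", "fonts"),
       ("mp4", "media"), ("webm", "media"), ("ogg", "media"), ("mp3", "media"), ("wav", "media")] from rfl]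
    simp only [hd1, if_true, ne_eq, not_false_iff, hkey,
      PySem.Dict.get?]
    by_cases e1 : t = ("css" : String).toList
    · simp [e1]
    by_cases e2 : t = ("js" : String).toList
    · simp [e2]
    by_cases e3 : t = ("png" : String).toList
    · simp [e3]
    by_cases e4 : t = ("jpg" : String).toList
    · simp [e4]
    by_cases e5 : t = ("jpeg" : String).toList
    · simp [e5]
    by_cases e6 : t = ("gif" : String).toList
    · simp [e6]
    by_cases e7 : t = ("svg" : String).toList
    · simp [e7]
    by_cases e8 : t = ("webp" : String).toList
    · simp [e8]
    by_cases e9 : t = ("ico" : String).toList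
    · simp [e9]
    by_cases e10 : t = ("bmp" : String).toList
    · simp [e10]
    by_cases e11 : t = ("woff" : String).toList
    · simp [e11]
    by_cases e12 : t = ("woff2" : String).toList
    · simp [e12]
    by_cases e13 : t = ("ttf" : String).toList
    · simp [e13]
    by_cases e14 : t = ("eot" : String).toList
    · simp [e14]
    by_cases e15 : t = ("otf" : String).toList
    · simp [e15]
    by_cases e16 : t = ("mp4" : String).toList
    · simp [e16]
    by_cases e17 : t = ("webm" : String).toList
    · simp [e17]
    by_cases e18 : t = ("ogg" : String).toList
    · simp [e18]
    by_cases e19 : t = ("mp3" : String).toList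
    · simp [e19]
    by_cases e20 : t = ("wav" : String).toList
    · simp [e20]
    have f1 : ¬ t = ['c', 's', 's'] := e1
    have f2 : ¬ t = ['j', 's'] := e2
    have f3 : ¬ t = ['p', 'n', 'g'] := e3
    have f4 : ¬ t = ['j', 'p', 'g'] := e4
    have f5 : ¬ t = ['j', 'p', 'e', 'g'] := e5
    have f6 : ¬ t = ['g', 'i', 'f'] := e6
    have f7 : ¬ t = ['s', 'v', 'g'] := e7
    have f8 : ¬ t = ['w', 'e', 'b', 'p'] := e8
    have f9 : ¬ t = ['i', 'c', 'o'] := e9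
    have f10 : ¬ t = ['b', 'm', 'p'] := e10
    have f11 : ¬ t = ['w', 'o', 'f', 'f'] := e11
    have f12 : ¬ t = ['w', 'o', 'f', 'f', '2'] := e12
    have f13 : ¬ t = ['t', 't', 'f'] := e13
    have f14 : ¬ t = ['e', 'o', 't'] := e14
    have f15 : ¬ t = ['o', 't', 'f'] := e15
    have f16 : ¬ t = ['m', 'p', '4'] := e16
    have f17 : ¬ t = ['w', 'e', 'b', 'm'] := e17
    have f18 : ¬ t = ['o', 'g', 'g'] := e18
    have f19 : ¬ t = ['m', 'p', '3'] := e19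
    have f20 : ¬ t = ['w', 'a', 'v'] := e20
    have hfind : List.find? (fun p => decide (t = p.1.toList))
        [("css", "css"), ("js", "js"), ("png", "images"), ("jpg", "images"), ("jpeg", "images"),
         ("gif", "images"), ("svg", "images"), ("webp", "images"), ("ico", "images"), ("bmp", "images"),
         ("woff", "fonts"), ("woff2", "fonts"), ("ttf", "fonts"), ("eot", "fonts"), ("otf", "fonts"),
         ("mp4", "media"), ("webm", "media"), ("ogg", "media"), ("mp3", "media"), ("wav", "media")]
        = none := by
      simp [f1, f2, f3, f4, f5, f6, f7, f8, f9, f10, f11, f12, f13, f14, f15,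
        f16, f17, f18, f19, f20]
    simp [hfind, f1, f2, f3, f4, f5, f6, f7, f8, f9, f10, f11, f12, f13, f14, f15, f16, f17,
      f18, f19, f20]
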